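-- pv_equiv track=rewrite | github.com/FeherMarcell/AU-PhD-Scratchbook | hamming.py | _mul_mat_vec
-- ===== SOURCE A (Python) =====
-- def _gf2_add(bit1, bit2):
--     # Mod2 addition = XOR
--     return int(bool(bit1) != bool(bit2))
--
-- def _gf2_mul(bit1, bit2):
--     # Mod2 multiplication = AND
--     return int(bool(bit1) and bool(bit2))
--
-- def _mul_mat_vec(matrix, vector):
--     # Matrix x Vector multiplication
--
--     # The matrix must have the same number of cols than the vector's rows
--     if len(matrix[0]) != len(vector):
--         raise ValueError("Wrong dimensions! Vector length {} must be the same as matrix columns {}".format(len(vector), len(matrix[0])))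
--
--     result = [0] * len(matrix)
--     for (rowidx, row) in enumerate(matrix):
--         for (colidx, col) in enumerate(row):
--             result[rowidx] = _gf2_add(result[rowidx], _gf2_mul(col, vector[colidx]))
--
--     return result
-- ===== SOURCE B (Python) =====
-- def _mul_mat_vec(matrix, vector):
--     # Bit-packed GF(2) matrix-vector product: pack the vector and each row
--     # into integers and take the parity of the popcount of their AND.
--     if len(matrix[0]) != len(vector):
--         raise ValueError("Wrong dimensions! Vector length {} must be the same as matrix columns {}".format(len(vector), len(matrix[0])))
--
--     V = 0
--     for (j, v) in enumerate(vector):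
--         if v:
--             V |= 1 << j
--
--     result = []
--     for row in matrix:
--         R = 0
--         for (j, c) in enumerate(row):
--             if c:
--                 R |= 1 << j
--         result.append((R & V).bit_count() % 2)
--     return result
-- ===== Notes on version B (the rewrite author's own statement) =====
-- stated objective: alternative
-- what changed: Replaces the per-cell GF(2) add/mul accumulation into a preallocated result list by bit-packing the vector once and each row into integers, computing each output as popcount(R & V) % 2.
import Mathlib
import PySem

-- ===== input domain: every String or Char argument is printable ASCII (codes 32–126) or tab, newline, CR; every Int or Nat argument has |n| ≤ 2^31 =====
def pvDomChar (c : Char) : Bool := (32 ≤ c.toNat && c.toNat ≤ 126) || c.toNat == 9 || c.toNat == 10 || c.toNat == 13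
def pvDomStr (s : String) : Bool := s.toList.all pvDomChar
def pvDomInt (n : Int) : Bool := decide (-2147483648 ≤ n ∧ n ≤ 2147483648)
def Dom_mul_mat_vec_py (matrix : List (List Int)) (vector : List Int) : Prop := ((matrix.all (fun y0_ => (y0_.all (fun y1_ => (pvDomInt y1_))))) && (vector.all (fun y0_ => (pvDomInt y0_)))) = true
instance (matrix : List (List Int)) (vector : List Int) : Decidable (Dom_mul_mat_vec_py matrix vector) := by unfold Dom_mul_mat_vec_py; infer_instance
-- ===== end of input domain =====

-- B replaces A's per-cell GF(2) add/mul accumulation by bit-packing the vector and each row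
-- into integers and taking popcount(R & V) % 2 per row (objective: alternative algorithm).

-- ===== PORT A =====
-- helper _gf2_add: int(bool(bit1) != bool(bit2))
def gf2_add (bit1 bit2 : Int) : Int :=
  if decide (bit1 ≠ 0) != decide (bit2 ≠ 0) then 1 else 0

-- helper _gf2_mul: int(bool(bit1) and bool(bit2))
def gf2_mul (bit1 bit2 : Int) : Int :=
  if bit1 ≠ 0 ∧ bit2 ≠ 0 then 1 else 0

-- the dimension check 'len(matrix[0]) != len(vector)' raises outside Pre_; under Pre_ it passes,
-- and all pyGetD/pySetD accesses are in range under Pre_ (outside Pre_ A raises, nothing claimed)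
def mul_mat_vec_py (matrix : List (List Int)) (vector : List Int) : List Int :=
  (PySem.List.enumerate matrix).foldl
    (fun result p =>
      (PySem.List.enumerate p.2).foldl
        (fun result q =>
          PySem.List.pySetD result p.1
            (gf2_add (PySem.List.pyGetD result p.1 0)
                     (gf2_mul q.2 (PySem.List.pyGetD vector q.1 0))))
        result)
    (List.replicate matrix.length 0)

-- ===== PORT B =====
-- the enumerate index is the loop counter, hence nonnegative: '.toNat' is exact for '1 << j'
def mul_mat_vec_py_alt (matrix : List (List Int)) (vector : List Int) : List Int :=
  let V : Int := (PySem.List.enumerate vector).foldl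
      (fun (acc : Int) (p : Int × Int) => if p.2 ≠ 0 then PySem.Int.bor acc ((1 : Int) <<< p.1.toNat) else acc) 0
  matrix.foldl
    (fun result row =>
      let R : Int := (PySem.List.enumerate row).foldl
          (fun (acc : Int) (p : Int × Int) => if p.2 ≠ 0 then PySem.Int.bor acc ((1 : Int) <<< p.1.toNat) else acc) 0
      result ++ [((PySem.Int.bitCount (PySem.Int.band R V) % 2 : Nat) : Int)])
    []

-- ===== PRECONDITION & SPEC =====
-- Pre_ is exactly where A returns: it excludes only inputs where A raises — the empty matrix
-- (IndexError on matrix[0]), a first-row/vector length mismatch (ValueError), and a row longer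
-- than the vector (IndexError on vector[colidx]).
def Pre_mul_mat_vec_py (matrix : List (List Int)) (vector : List Int) : Prop :=
  matrix ≠ [] ∧ (matrix.headD []).length = vector.length ∧
    ∀ row ∈ matrix, row.length ≤ vector.length
instance (matrix : List (List Int)) (vector : List Int) : Decidable (Pre_mul_mat_vec_py matrix vector) := by unfold Pre_mul_mat_vec_py; infer_instance

def pvWitness_mul_mat_vec_py : List (List Int) × List Int := ([[1, 0], [1, 1]], [1, 0])

def Spec_mul_mat_vec_py (matrix : List (List Int)) (vector : List Int) (out : List Int) : Prop := out = mul_mat_vec_py_alt matrix vector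
instance (matrix : List (List Int)) (vector : List Int) (out : List Int) : Decidable (Spec_mul_mat_vec_py matrix vector out) := by unfold Spec_mul_mat_vec_py; infer_instance

-- ===== CLAIM (what is proved, stated in full; the proofs are below) =====
def Claim_equal_mul_mat_vec_py : Prop := ∀ (matrix : List (List Int)) (vector : List Int), Dom_mul_mat_vec_py matrix vector → Pre_mul_mat_vec_py matrix vector → Spec_mul_mat_vec_py matrix vector (mul_mat_vec_py matrix vector)

-- ===== LEMMAS AND PROOFS =====

-- bit packing over Nat, mirroring B's inner fold
def natPack (k : Nat) (l : List Int) (acc : Nat) : Nat :=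
  match l with
  | [] => acc
  | c :: r => natPack (k + 1) r (if c ≠ 0 then acc ||| (1 <<< k) else acc)

-- count of positions where both the row and the vector entry are truthy, mirroring A's inner loop
def cntAnd (vec : List Int) (k : Nat) (l : List Int) : Nat :=
  match l with
  | [] => 0
  | c :: r => (if c ≠ 0 ∧ vec.getD k 0 ≠ 0 then 1 else 0) + cntAnd vec (k + 1) r

theorem bor_one_shift (acc k : Nat) :
    PySem.Int.bor ((acc : Nat) : Int) ((1 : Int) <<< k) = (((acc ||| (1 <<< k) : Nat)) : Int) := by
  rw [Int.shiftLeft_eq, one_mul, Nat.one_shiftLeft,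
    show ((2 : Int) ^ k) = (((2 ^ k : Nat)) : Int) by push_cast; ring,
    PySem.Int.bor_natCast]

theorem packFold (l : List Int) : ∀ (k acc : Nat),
    (PySem.List.enumerate l (k : Int)).foldl
      (fun (acc : Int) (p : Int × Int) => if p.2 ≠ 0 then PySem.Int.bor acc ((1 : Int) <<< p.1.toNat) else acc)
      ((acc : Nat) : Int) = ((natPack k l acc : Nat) : Int) := by
  induction l with
  | nil => intro k acc; simp [natPack, PySem.List.enumerate]
  | cons c r ih =>
    intro k acc
    rw [PySem.List.enumerate_cons, List.foldl_cons]
    have hcast : ((k : Int) + 1) = ((k + 1 : Nat) : Int) := by push_cast; ring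
    rw [hcast]
    simp only [Int.toNat_natCast]
    by_cases hc : c ≠ 0
    · rw [if_pos hc, bor_one_shift, ih (k+1) (acc ||| (1 <<< k))]
      simp [natPack, hc]
    · rw [if_neg hc, ih (k+1) acc]
      simp [natPack, hc]

theorem natPack_testBit (l : List Int) : ∀ (k acc j : Nat),
    (natPack k l acc).testBit j = true ↔
      (acc.testBit j = true ∨ (k ≤ j ∧ j < k + l.length ∧ l.getD (j - k) 0 ≠ 0)) := by
  induction l with
  | nil =>
    intro k acc j
    simp only [natPack, List.length_nil, Nat.add_zero]
    constructor
    · exact Or.inl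
    · rintro (h | ⟨h1, h2, _⟩); · exact h
      omega
  | cons c r ih =>
    intro k acc j
    simp only [natPack, List.length_cons]
    rw [ih]
    by_cases hjk : j = k
    · subst hjk
      by_cases hc : c ≠ 0
      · rw [if_pos hc]
        constructor
        · intro _
          exact Or.inr ⟨le_refl _, by omega, by simpa using hc⟩
        · intro _
          left
          rw [Nat.testBit_or, Nat.one_shiftLeft, Nat.testBit_two_pow]
          simp
      · rw [if_neg hc]
        constructor
        · rintro (h | ⟨h1, _, _⟩)
          · exact Or.inl h
          · omega
        · rintro (h | ⟨_, _, h3⟩)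
          · exact Or.inl h
          · simp at hc
            simp [hc] at h3
    · have hsub : k ≤ j → (c :: r).getD (j - k) 0 = r.getD (j - (k + 1)) 0 := by
        intro hk
        have hd : j - k = (j - (k + 1)) + 1 := by omega
        rw [hd]; rfl
      have hacc : (if c ≠ 0 then acc ||| (1 <<< k) else acc).testBit j = acc.testBit j := by
        split_ifs
        · rw [Nat.testBit_or, Nat.one_shiftLeft, Nat.testBit_two_pow]
          simp [show k ≠ j from fun h => hjk h.symm]
        · rfl
      rw [hacc]
      constructor
      · rintro (h | ⟨h1, h2, h3⟩)
        · exact Or.inl h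
        · exact Or.inr ⟨by omega, by omega, by rw [hsub (by omega)]; exact h3⟩
      · rintro (h | ⟨h1, h2, h3⟩)
        · exact Or.inl h
        · refine Or.inr ⟨by omega, by omega, ?_⟩
          rw [hsub (by omega)] at h3
          exact h3

theorem natPack_lt (l : List Int) : ∀ (k acc : Nat), acc < 2 ^ k →
    natPack k l acc < 2 ^ (k + l.length) := by
  induction l with
  | nil => intro k acc h; simpa [natPack] using h
  | cons c r ih =>
    intro k acc h
    simp only [natPack, List.length_cons]
    have h2 : (if c ≠ 0 then acc ||| (1 <<< k) else acc) < 2 ^ (k + 1) := by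
      split_ifs
      · exact Nat.or_lt_two_pow (lt_trans h (by simp [Nat.pow_lt_pow_right]))
          (by rw [Nat.one_shiftLeft]; exact Nat.pow_lt_pow_right (by omega) (by omega))
      · exact lt_trans h (Nat.pow_lt_pow_right (by omega) (by omega))
    have := ih (k+1) _ h2
    have he : k + 1 + r.length = k + (r.length + 1) := by omega
    rw [he] at this
    exact this

theorem bitCount_eq_sum : ∀ (t m : Nat), m < 2 ^ t →
    PySem.Int.bitCount (m : Int) = ∑ j ∈ Finset.range t, (if m.testBit j then 1 else 0) := by
  intro t
  induction t with
  | zero =>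
    intro m h
    interval_cases m
    simp [PySem.Int.bitCount_zero]
  | succ t ih =>
    intro m h
    rcases Nat.eq_zero_or_pos m with hm | hm
    · subst hm
      simp [PySem.Int.bitCount_zero, Nat.zero_testBit]
    · rw [PySem.Int.bitCount_natCast hm, Finset.sum_range_succ']
      have hdiv : m / 2 < 2 ^ t := by
        rw [Nat.pow_succ] at h
        omega
      rw [ih (m / 2) hdiv]
      have hbit0 : (if m.testBit 0 then 1 else 0) = m % 2 := by
        rw [Nat.testBit_zero]
        split_ifs with h0 <;> simp at h0 <;> omega
      have hbits : ∑ j ∈ Finset.range t, (if (m / 2).testBit j then 1 else 0)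
          = ∑ j ∈ Finset.range t, (if m.testBit (j + 1) then 1 else 0) := by
        refine Finset.sum_congr rfl fun j _ => ?_
        rw [Nat.testBit_add_one]
      rw [hbits, hbit0]
      omega

theorem cntAnd_eq_sum (vec : List Int) (l : List Int) : ∀ (k : Nat),
    cntAnd vec k l = ∑ j ∈ Finset.range l.length,
      (if l.getD j 0 ≠ 0 ∧ vec.getD (k + j) 0 ≠ 0 then 1 else 0) := by
  induction l with
  | nil => intro k; simp [cntAnd]
  | cons c r ih =>
    intro k
    rw [List.length_cons, Finset.sum_range_succ']
    simp only [cntAnd, ih (k + 1)]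
    have h1 : ∀ j, (c :: r).getD (j + 1) 0 = r.getD j 0 := fun j => rfl
    have h2 : (c :: r).getD 0 0 = c := rfl
    simp only [h1, h2, Nat.add_zero]
    have h3 : ∀ j, k + 1 + j = k + (j + 1) := by omega
    simp only [h3]
    omega

theorem scalarA (vec : List Int) (l : List Int) : ∀ (k a : Nat),
    (PySem.List.enumerate l (k : Int)).foldl
      (fun acc q => gf2_add acc (gf2_mul q.2 (PySem.List.pyGetD vec q.1 0)))
      ((a % 2 : Nat) : Int)
    = (((a + cntAnd vec k l) % 2 : Nat) : Int) := by
  induction l with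
  | nil => intro k a; simp [cntAnd, PySem.List.enumerate]
  | cons c r ih =>
    intro k a
    rw [PySem.List.enumerate_cons, List.foldl_cons]
    have hcast : ((k : Int) + 1) = ((k + 1 : Nat) : Int) := by push_cast; ring
    rw [hcast]
    have hstep : gf2_add ((a % 2 : Nat) : Int) (gf2_mul c (PySem.List.pyGetD vec (k : Int) 0))
        = (((a + (if c ≠ 0 ∧ vec.getD k 0 ≠ 0 then 1 else 0)) % 2 : Nat) : Int) := by
      rw [PySem.List.pyGetD_natCast]
      by_cases hcv : (c ≠ 0 ∧ vec.getD k 0 ≠ 0) <;>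
        rcases Nat.mod_two_eq_zero_or_one a with h | h <;>
        simp [gf2_add, gf2_mul, hcv, h] <;>
        omega
    rw [hstep, ih (k + 1) (a + (if c ≠ 0 ∧ vec.getD k 0 ≠ 0 then 1 else 0))]
    simp only [cntAnd]
    congr 2
    omega

theorem set_getD_self (res : List Int) (k : Nat) (h : k < res.length) :
    res.set k (res.getD k 0) = res := by
  rw [List.getD_eq_getElem _ _ h]
  exact List.set_getElem_self h

theorem getD_set_self (res : List Int) (k : Nat) (v : Int) (h : k < res.length) :
    (res.set k v).getD k 0 = v := by
  rw [List.getD_eq_getElem?_getD, List.getElem?_set_self h]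
  rfl

theorem foldl_pySetD (vec : List Int) : ∀ (ps : List (Int × Int)) (res : List Int) (k : Nat),
    k < res.length →
    ps.foldl
      (fun result q =>
        PySem.List.pySetD result (k : Int)
          (gf2_add (PySem.List.pyGetD result (k : Int) 0)
                   (gf2_mul q.2 (PySem.List.pyGetD vec q.1 0)))) res
    = res.set k (ps.foldl
        (fun acc q => gf2_add acc (gf2_mul q.2 (PySem.List.pyGetD vec q.1 0)))
        (res.getD k 0)) := by
  intro ps
  induction ps with
  | nil =>
    intro res k h
    simp only [List.foldl_nil]
    rw [set_getD_self res k h]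
  | cons q qs ih =>
    intro res k h
    simp only [List.foldl_cons]
    rw [PySem.List.pySetD_natCast, PySem.List.pyGetD_natCast]
    rw [ih (res.set k _) k (by simpa using h)]
    rw [List.set_set, getD_set_self res k _ h]

theorem outerA (vec : List Int) : ∀ (rows : List (List Int)) (k : Nat) (pre : List Int),
    pre.length = k →
    (PySem.List.enumerate rows (k : Int)).foldl
      (fun result p =>
        (PySem.List.enumerate p.2).foldl
          (fun result q =>
            PySem.List.pySetD result p.1
              (gf2_add (PySem.List.pyGetD result p.1 0)
                       (gf2_mul q.2 (PySem.List.pyGetD vec q.1 0))))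
          result)
      (pre ++ List.replicate rows.length 0)
    = pre ++ rows.map (fun row =>
        (PySem.List.enumerate row).foldl
          (fun acc q => gf2_add acc (gf2_mul q.2 (PySem.List.pyGetD vec q.1 0))) 0) := by
  intro rows
  induction rows with
  | nil => intro k pre h; simp [PySem.List.enumerate]
  | cons row rest ih =>
    intro k pre h
    rw [PySem.List.enumerate_cons, List.foldl_cons, List.length_cons, List.replicate_succ]
    have hlen : k < (pre ++ 0 :: List.replicate rest.length (0 : Int)).length := by
      simp; omega
    rw [foldl_pySetD vec _ _ k hlen]
    have hget : (pre ++ 0 :: List.replicate rest.length (0 : Int)).getD k 0 = 0 := by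
      rw [List.getD_eq_getElem?_getD, List.getElem?_append_right (by omega), ← h]
      simp
    rw [hget]
    have hset : (pre ++ 0 :: List.replicate rest.length (0 : Int)).set k
        ((PySem.List.enumerate row).foldl
          (fun acc q => gf2_add acc (gf2_mul q.2 (PySem.List.pyGetD vec q.1 0))) 0)
      = (pre ++ [(PySem.List.enumerate row).foldl
          (fun acc q => gf2_add acc (gf2_mul q.2 (PySem.List.pyGetD vec q.1 0))) 0])
        ++ List.replicate rest.length 0 := by
      rw [List.set_append, if_neg (by omega), ← h, Nat.sub_self, List.set_cons_zero,
        List.append_cons]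
    rw [hset]
    have hcast : ((k : Int) + 1) = ((k + 1 : Nat) : Int) := by push_cast; ring
    rw [hcast, ih (k + 1) _ (by simp; omega)]
    simp

theorem rowEq (vec row : List Int) (h : row.length ≤ vec.length) :
    (PySem.List.enumerate row).foldl
      (fun acc q => gf2_add acc (gf2_mul q.2 (PySem.List.pyGetD vec q.1 0))) 0
    = ((PySem.Int.bitCount (PySem.Int.band ((natPack 0 row 0 : Nat) : Int)
          ((natPack 0 vec 0 : Nat) : Int)) % 2 : Nat) : Int) := by
  have h0 : (PySem.List.enumerate row).foldl
      (fun acc q => gf2_add acc (gf2_mul q.2 (PySem.List.pyGetD vec q.1 0))) 0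
      = (PySem.List.enumerate row ((0 : Nat) : Int)).foldl
      (fun acc q => gf2_add acc (gf2_mul q.2 (PySem.List.pyGetD vec q.1 0))) (((0 % 2 : Nat)) : Int) := by
    norm_num
  rw [h0, scalarA vec row 0 0, PySem.Int.band_natCast]
  have hlt : natPack 0 row 0 &&& natPack 0 vec 0 < 2 ^ row.length := by
    have := natPack_lt row 0 0 (by norm_num)
    calc natPack 0 row 0 &&& natPack 0 vec 0 ≤ natPack 0 row 0 := Nat.and_le_left
      _ < 2 ^ row.length := by simpa using this
  rw [bitCount_eq_sum row.length _ hlt, cntAnd_eq_sum vec row 0]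
  have hs : (∑ j ∈ Finset.range row.length,
        (if row.getD j 0 ≠ 0 ∧ vec.getD (0 + j) 0 ≠ 0 then 1 else 0) : Nat)
      = ∑ j ∈ Finset.range row.length,
        (if (natPack 0 row 0 &&& natPack 0 vec 0).testBit j then 1 else 0) := by
    refine Finset.sum_congr rfl fun j hj => ?_
    rw [Finset.mem_range] at hj
    have hbit : (natPack 0 row 0 &&& natPack 0 vec 0).testBit j = true ↔
        (row.getD j 0 ≠ 0 ∧ vec.getD (0 + j) 0 ≠ 0) := by
      rw [Nat.testBit_and, Bool.and_eq_true, natPack_testBit, natPack_testBit]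
      simp only [Nat.zero_testBit, Bool.false_eq_true, false_or, Nat.zero_add, Nat.sub_zero,
        Nat.zero_le, true_and]
      constructor
      · rintro ⟨⟨_, hr⟩, ⟨_, hv⟩⟩
        exact ⟨hr, by simpa using hv⟩
      · rintro ⟨hr, hv⟩
        exact ⟨⟨hj, hr⟩, ⟨by omega, by simpa using hv⟩⟩
    simp only [hbit]
  rw [hs]
  norm_num


-- ===== VERDICT (by name: the statement is the Claim_ definition above) =====

theorem mul_mat_vec_py_spec : Claim_equal_mul_mat_vec_py := by
  intro matrix vector _ hpre
  obtain ⟨-, -, hall⟩ := hpre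
  show mul_mat_vec_py matrix vector = mul_mat_vec_py_alt matrix vector
  have hA : mul_mat_vec_py matrix vector = matrix.map (fun row =>
      (PySem.List.enumerate row).foldl
        (fun acc q => gf2_add acc (gf2_mul q.2 (PySem.List.pyGetD vector q.1 0))) 0) := by
    unfold mul_mat_vec_py
    have h := outerA vector matrix 0 [] rfl
    simpa using h
  have hB : mul_mat_vec_py_alt matrix vector = matrix.map (fun row =>
      ((PySem.Int.bitCount (PySem.Int.band
          ((PySem.List.enumerate row).foldl
            (fun (acc : Int) (p : Int × Int) =>
              if p.2 ≠ 0 then PySem.Int.bor acc ((1 : Int) <<< p.1.toNat) else acc) 0)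
          ((natPack 0 vector 0 : Nat) : Int)) % 2 : Nat) : Int)) := by
    have hV : (PySem.List.enumerate vector).foldl
        (fun (acc : Int) (p : Int × Int) =>
          if p.2 ≠ 0 then PySem.Int.bor acc ((1 : Int) <<< p.1.toNat) else acc) 0
        = ((natPack 0 vector 0 : Nat) : Int) := by
      simpa using packFold vector 0 0
    simp only [mul_mat_vec_py_alt]
    rw [hV, PySem.List.foldl_append_singleton_eq_map (fun row =>
      ((PySem.Int.bitCount (PySem.Int.band
          ((PySem.List.enumerate row).foldl
            (fun (acc : Int) (p : Int × Int) =>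
              if p.2 ≠ 0 then PySem.Int.bor acc ((1 : Int) <<< p.1.toNat) else acc) 0)
          ((natPack 0 vector 0 : Nat) : Int)) % 2 : Nat) : Int)) matrix []]
    rw [List.nil_append]
  rw [hA, hB]
  refine List.map_congr_left fun row hmem => ?_
  have hR : (PySem.List.enumerate row).foldl
      (fun (acc : Int) (p : Int × Int) =>
        if p.2 ≠ 0 then PySem.Int.bor acc ((1 : Int) <<< p.1.toNat) else acc) 0
      = ((natPack 0 row 0 : Nat) : Int) := by
    simpa using packFold row 0 0
  rw [hR]
  exact rowEq vector row (hall row hmem)
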